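-- pv_equiv track=rewrite | github.com/manuelrubio/recursion | tema06/codigo_06_05.py | particion_Hoare_rec
-- ===== SOURCE A (Python) =====
-- def particion_Hoare_rec(a, izq, dcha, pivote):
--     if izq > dcha:
--         return dcha
--     else:
--         if a[izq] > pivote and a[dcha] <= pivote:
--             aux = a[izq]
--             a[izq] = a[dcha]
--             a[dcha] = aux
--             return particion_Hoare_rec(a, izq + 1, dcha - 1, pivote)
--         else:
--             if a[izq] <= pivote:
--                 izq = izq + 1
--             if a[dcha] > pivote:
--                 dcha = dcha - 1
--             return particion_Hoare_rec(a, izq, dcha, pivote)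
-- ===== SOURCE B (Python) =====
-- def particion_Hoare_rec(a, izq, dcha, pivote):
--     while True:
--         while izq <= dcha and a[izq] <= pivote:
--             izq += 1
--         while izq <= dcha and a[dcha] > pivote:
--             dcha -= 1
--         if izq > dcha:
--             return dcha
--         a[izq], a[dcha] = a[dcha], a[izq]
--         izq += 1
--         dcha -= 1
-- ===== Notes on version B (the rewrite author's own statement) =====
-- stated objective: alternative
-- what changed: Replaced A's recursive lockstep pointer movement (one comparison pair and at most one step of each pointer per recursive call) by the classic iterative Hoare partition: two inner skip-loops advance izq over elements <= pivote and retreat dcha over elements > pivote, then swap and continue; same cost, different control structure.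
import Mathlib
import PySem

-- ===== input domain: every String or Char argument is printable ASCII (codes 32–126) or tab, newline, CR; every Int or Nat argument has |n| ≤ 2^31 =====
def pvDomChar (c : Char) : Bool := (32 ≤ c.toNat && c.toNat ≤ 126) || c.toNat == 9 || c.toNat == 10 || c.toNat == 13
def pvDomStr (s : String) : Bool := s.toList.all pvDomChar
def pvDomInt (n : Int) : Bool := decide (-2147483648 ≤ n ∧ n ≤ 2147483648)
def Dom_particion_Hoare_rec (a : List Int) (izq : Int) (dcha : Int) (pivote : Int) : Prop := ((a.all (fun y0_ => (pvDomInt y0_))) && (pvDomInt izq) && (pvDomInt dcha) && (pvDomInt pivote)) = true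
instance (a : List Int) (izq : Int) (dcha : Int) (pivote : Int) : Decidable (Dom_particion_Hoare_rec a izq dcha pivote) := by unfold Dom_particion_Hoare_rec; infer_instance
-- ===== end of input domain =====

-- B rewrites A's recursive lockstep pointer movement as the classic iterative Hoare
-- partition (two inner skip loops, then swap); same decomposition of work, iterative
-- instead of recursive ("alternative"). Both A and B mutate `a` in place with the
-- same swaps; the equivalence proved here is about the RETURN value only.

-- termination measures (cited by name from decreasing_by; proved by small explicit
-- terms so the definitions carry only tiny proof terms)
theorem pvToNatLtAux {x y : Int} (hle : x ≤ y) : (y - x).toNat < (y - x + 1).toNat :=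
  (Int.toNat_lt_toNat (Int.lt_add_one_iff.mpr (sub_nonneg.mpr hle))).mpr (lt_add_one _)

theorem pvDecL {izq dcha : Int} (h : izq ≤ dcha) :
    (dcha - (izq + 1) + 1).toNat < (dcha - izq + 1).toNat := by
  rw [sub_add_eq_sub_sub, sub_add_cancel]
  exact pvToNatLtAux h

theorem pvDecR {izq dcha : Int} (h : izq ≤ dcha) :
    (dcha - 1 - izq + 1).toNat < (dcha - izq + 1).toNat := by
  rw [sub_right_comm, sub_add_cancel]
  exact pvToNatLtAux h

theorem pvDecSwap {izq dcha : Int} (h : ¬ izq > dcha) :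
    (dcha - 1 - (izq + 1) + 1).toNat < (dcha - izq + 1).toNat :=
  (Int.toNat_lt_toNat (Int.lt_add_one_iff.mpr (sub_nonneg.mpr (not_lt.mp h)))).mpr
    (by rw [sub_add_eq_sub_sub, sub_add_cancel, sub_right_comm]
        exact lt_trans (sub_one_lt _) (lt_add_one _))

theorem pvDecElse {izq dcha ai ad p : Int} (h : ¬ izq > dcha) (hn : ¬ (ai > p ∧ ad ≤ p)) :
    ((if ad > p then dcha - 1 else dcha) - (if ai ≤ p then izq + 1 else izq) + 1).toNat
      < (dcha - izq + 1).toNat := by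
  split_ifs with h1 h2 h2
  · exact pvDecSwap h
  · exact pvDecR (not_lt.mp h)
  · exact pvDecL (not_lt.mp h)
  · exact absurd ⟨not_le.mp h2, not_lt.mp h1⟩ hn

theorem pvDecLoop {izq dcha i d : Int} (h1 : izq ≤ i) (h2 : d ≤ dcha) (h3 : ¬ i > d) :
    (d - 1 - (i + 1) + 1).toNat < (dcha - izq + 1).toNat :=
  (Int.toNat_lt_toNat (Int.lt_add_one_iff.mpr (sub_nonneg.mpr
      (le_trans (le_trans h1 (not_lt.mp h3)) h2)))).mpr
    (by rw [sub_add_eq_sub_sub, sub_add_cancel, sub_right_comm]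
        exact lt_of_le_of_lt (le_trans (le_of_lt (sub_one_lt _)) (sub_le_sub h2 h1))
          (lt_add_one _))

-- ===== PORT A =====
-- Python a[i], a[d] = a[d], a[i] (after reading both values): two in-range assignments
def pvSwap (a : List Int) (i d : Int) (ai ad : Int) : List Int :=
  PySem.List.pySetD (PySem.List.pySetD a i ad) d ai

def particion_Hoare_rec (a : List Int) (izq : Int) (dcha : Int) (pivote : Int) : Int :=
  if izq > dcha then dcha
  else
    match PySem.List.pyGet? a izq, PySem.List.pyGet? a dcha with
    | some ai, some ad =>
      if ai > pivote ∧ ad ≤ pivote then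
        particion_Hoare_rec (pvSwap a izq dcha ai ad) (izq + 1) (dcha - 1) pivote
      else
        particion_Hoare_rec a (if ai ≤ pivote then izq + 1 else izq)
          (if ad > pivote then dcha - 1 else dcha) pivote
    | _, _ => dcha  -- Python raises IndexError here (outside Pre_)
  termination_by (dcha - izq + 1).toNat
  decreasing_by
  · exact pvDecSwap ‹¬ izq > dcha›
  · exact pvDecElse ‹¬ izq > dcha› ‹¬ (_ > pivote ∧ _ ≤ pivote)›

-- ===== PORT B =====
-- while izq <= dcha and a[izq] <= pivote: izq += 1   (stops on IndexError region too; outside Pre_)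
def pvSkipL (a : List Int) (izq dcha pivote : Int) : Int :=
  if izq ≤ dcha then
    match PySem.List.pyGet? a izq with
    | some ai => if ai ≤ pivote then pvSkipL a (izq + 1) dcha pivote else izq
    | none => izq
  else izq
  termination_by (dcha - izq + 1).toNat
  decreasing_by exact pvDecL ‹izq ≤ dcha›

-- while izq <= dcha and a[dcha] > pivote: dcha -= 1
def pvSkipR (a : List Int) (izq dcha pivote : Int) : Int :=
  if izq ≤ dcha then
    match PySem.List.pyGet? a dcha with
    | some ad => if ad > pivote then pvSkipR a izq (dcha - 1) pivote else dcha
    | none => dcha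
  else dcha
  termination_by (dcha - izq + 1).toNat
  decreasing_by exact pvDecR ‹izq ≤ dcha›

theorem pvSkipL_ge (a : List Int) (izq dcha pivote : Int) : izq ≤ pvSkipL a izq dcha pivote := by
  unfold pvSkipL
  split
  · split
    · split
      · have := pvSkipL_ge a (izq + 1) dcha pivote; omega
      · omega
    · omega
  · omega
  termination_by (dcha - izq + 1).toNat
  decreasing_by exact pvDecL ‹_ ≤ _›

theorem pvSkipR_le (a : List Int) (izq dcha pivote : Int) : pvSkipR a izq dcha pivote ≤ dcha := by
  unfold pvSkipR
  split
  · split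
    · split
      · have := pvSkipR_le a izq (dcha - 1) pivote; omega
      · omega
    · omega
  · omega
  termination_by (dcha - izq + 1).toNat
  decreasing_by exact pvDecR ‹_ ≤ _›

def pvLoop (a : List Int) (izq dcha pivote : Int) : Int :=
  if pvSkipL a izq dcha pivote > pvSkipR a (pvSkipL a izq dcha pivote) dcha pivote then
    pvSkipR a (pvSkipL a izq dcha pivote) dcha pivote
  else
    -- Python's swap evaluates the pair (a[dcha], a[izq]) first, so read a[dcha] first
    match PySem.List.pyGet? a (pvSkipR a (pvSkipL a izq dcha pivote) dcha pivote) with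
    | some ad =>
      match PySem.List.pyGet? a (pvSkipL a izq dcha pivote) with
      | some ai =>
        pvLoop (pvSwap a (pvSkipL a izq dcha pivote)
            (pvSkipR a (pvSkipL a izq dcha pivote) dcha pivote) ai ad)
          (pvSkipL a izq dcha pivote + 1)
          (pvSkipR a (pvSkipL a izq dcha pivote) dcha pivote - 1) pivote
      | none => pvSkipR a (pvSkipL a izq dcha pivote) dcha pivote  -- IndexError (outside Pre_)
    | none => pvSkipR a (pvSkipL a izq dcha pivote) dcha pivote  -- IndexError (outside Pre_)
  termination_by (dcha - izq + 1).toNat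
  decreasing_by
    exact pvDecLoop (pvSkipL_ge a izq dcha pivote)
      (pvSkipR_le a (pvSkipL a izq dcha pivote) dcha pivote) ‹_›

def particion_Hoare_rec_alt (a : List Int) (izq : Int) (dcha : Int) (pivote : Int) : Int :=
  pvLoop a izq dcha pivote

-- ===== PRECONDITION & SPEC =====
-- Pre_ excludes exactly the inputs on which A raises IndexError: izq ≤ dcha with one
-- of the two indices outside Python's (wraparound-included) range of `a`.
def Pre_particion_Hoare_rec (a : List Int) (izq : Int) (dcha : Int) (pivote : Int) : Prop :=
  izq > dcha ∨ (-(a.length : Int) ≤ izq ∧ dcha < a.length)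
instance (a : List Int) (izq : Int) (dcha : Int) (pivote : Int) : Decidable (Pre_particion_Hoare_rec a izq dcha pivote) := by unfold Pre_particion_Hoare_rec; infer_instance

def pvWitness_particion_Hoare_rec : List Int × Int × Int × Int := ([3, 1, 4, 1, 5], 0, 4, 3)

def Spec_particion_Hoare_rec (a : List Int) (izq : Int) (dcha : Int) (pivote : Int) (out : Int) : Prop := out = particion_Hoare_rec_alt a izq dcha pivote
instance (a : List Int) (izq : Int) (dcha : Int) (pivote : Int) (out : Int) : Decidable (Spec_particion_Hoare_rec a izq dcha pivote out) := by unfold Spec_particion_Hoare_rec; infer_instance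

-- ===== CLAIM (what is proved, stated in full; the proofs are below) =====
def Claim_equal_particion_Hoare_rec : Prop := ∀ (a : List Int) (izq : Int) (dcha : Int) (pivote : Int), Dom_particion_Hoare_rec a izq dcha pivote → Pre_particion_Hoare_rec a izq dcha pivote → Spec_particion_Hoare_rec a izq dcha pivote (particion_Hoare_rec a izq dcha pivote)

-- ===== LEMMAS AND PROOFS =====

theorem pvGet_some (a : List Int) (i : Int) (h1 : -(a.length : Int) ≤ i) (h2 : i < a.length) :
    ∃ v, PySem.List.pyGet? a i = some v := by
  cases hv : PySem.List.pyGet? a i with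
  | some v => exact ⟨v, rfl⟩
  | none =>
    rw [PySem.List.pyGet?_eq_none_iff] at hv
    exact absurd ⟨h1, h2⟩ hv

theorem pvSwap_length (a : List Int) (i d ai ad : Int) :
    (pvSwap a i d ai ad).length = a.length := by
  simp [pvSwap, PySem.List.length_pySetD]

-- one-step / stop equations for the two skip loops of B
theorem pvSL_step (a : List Int) (i d p ai : Int) (hid : i ≤ d)
    (hai : PySem.List.pyGet? a i = some ai) (hle : ai ≤ p) :
    pvSkipL a i d p = pvSkipL a (i + 1) d p := by
  conv_lhs => rw [pvSkipL]
  simp only [hai, if_pos hid, if_pos hle]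

theorem pvSL_stop (a : List Int) (i d p ai : Int)
    (hai : PySem.List.pyGet? a i = some ai) (hgt : p < ai) :
    pvSkipL a i d p = i := by
  rw [pvSkipL]
  split
  · simp only [hai]; rw [if_neg (by omega)]
  · rfl

theorem pvSL_off (a : List Int) (i d p : Int) (h : d < i) : pvSkipL a i d p = i := by
  rw [pvSkipL, if_neg (by omega)]

theorem pvSR_step (a : List Int) (i d p ad : Int) (hid : i ≤ d)
    (had : PySem.List.pyGet? a d = some ad) (hgt : p < ad) :
    pvSkipR a i d p = pvSkipR a i (d - 1) p := by
  conv_lhs => rw [pvSkipR]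
  simp only [had, if_pos hid, if_pos hgt]

theorem pvSR_stop (a : List Int) (i d p ad : Int)
    (had : PySem.List.pyGet? a d = some ad) (hle : ad ≤ p) :
    pvSkipR a i d p = d := by
  rw [pvSkipR]
  split
  · simp only [had]; rw [if_neg (by omega)]
  · rfl

theorem pvSR_off (a : List Int) (i d p : Int) (h : d < i) : pvSkipR a i d p = d := by
  rw [pvSkipR, if_neg (by omega)]

-- A returns dcha as soon as izq > dcha
theorem pvA_off (a : List Int) (i d p : Int) (h : d < i) : particion_Hoare_rec a i d p = d := by
  rw [particion_Hoare_rec, if_pos (by omega)]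

theorem pvLoop_off (a : List Int) (i d p : Int) (h : d < i) : pvLoop a i d p = d := by
  rw [pvLoop]
  simp only [pvSL_off a i d p h, pvSR_off a i d p h]
  rw [if_pos (by omega)]

-- the two pointer-advance commutation lemmas about A, proved mutually by strong
-- induction on (dcha - izq).toNat
theorem pvA_advance (n : Nat) (a : List Int) (p i d : Int)
    (hm : (d - i).toNat ≤ n) (hb1 : -(a.length : Int) ≤ i) (hb2 : d < a.length) :
    (i ≤ d → ∀ ai, PySem.List.pyGet? a i = some ai → ai ≤ p →
        particion_Hoare_rec a i d p = particion_Hoare_rec a (i + 1) d p) ∧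
    (i ≤ d → ∀ ad, PySem.List.pyGet? a d = some ad → p < ad →
        particion_Hoare_rec a i d p = particion_Hoare_rec a i (d - 1) p) := by
  induction n generalizing a i d with
  | zero =>
    constructor
    · intro hid ai hai hle
      have hie : i = d := by omega
      subst hie
      conv_lhs => rw [particion_Hoare_rec]
      simp only [hai, if_neg (by omega : ¬ i > i)]
      rw [if_neg (by intro ⟨h1, _⟩; omega), if_pos hle, if_neg (by omega)]
    · intro hid ad had hgt
      have hie : i = d := by omega
      subst hie
      conv_lhs => rw [particion_Hoare_rec]
      simp only [had, if_neg (by omega : ¬ i > i)]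
      rw [if_neg (by intro ⟨_, h2⟩; omega), if_neg (by omega), if_pos (by omega)]
  | succ m ih =>
    constructor
    · -- LA: a[i] ≤ p, so A moves izq (and possibly dcha) one step
      intro hid ai hai hle
      obtain ⟨ad, had⟩ := pvGet_some a d (by omega) hb2
      conv_lhs => rw [particion_Hoare_rec]
      simp only [hai, had, if_neg (by omega : ¬ i > d)]
      rw [if_neg (by intro ⟨h1, _⟩; omega), if_pos hle]
      by_cases hdp : p < ad
      · have hne : i ≠ d := by
          intro he; subst he; rw [hai] at had; injection had with he'; omega
        rw [if_pos hdp]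
        exact ((ih a (i + 1) d (by omega) (by omega) hb2).2 (by omega) ad had hdp).symm
      · rw [if_neg hdp]
    · -- LB: a[d] > p, so A moves dcha (and possibly izq) one step
      intro hid ad had hgt
      obtain ⟨ai, hai⟩ := pvGet_some a i hb1 (by omega)
      conv_lhs => rw [particion_Hoare_rec]
      simp only [hai, had, if_neg (by omega : ¬ i > d)]
      rw [if_neg (by intro ⟨_, h2⟩; omega), if_pos hgt]
      by_cases hip : ai ≤ p
      · have hne : i ≠ d := by
          intro he; subst he; rw [hai] at had; injection had with he'; omega
        rw [if_pos hip]
        exact ((ih a i (d - 1) (by omega) hb1 (by omega)).1 (by omega) ai hai hip).symm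
      · rw [if_neg hip]

-- B's loop absorbs one skip step on either side
theorem pvLoop_skipL (a : List Int) (i d p ai : Int) (hid : i ≤ d)
    (hai : PySem.List.pyGet? a i = some ai) (hle : ai ≤ p) :
    pvLoop a i d p = pvLoop a (i + 1) d p := by
  conv_lhs => rw [pvLoop]
  conv_rhs => rw [pvLoop]
  rw [pvSL_step a i d p ai hid hai hle]

theorem pvLoop_skipR (a : List Int) (i d p ai ad : Int) (hid : i ≤ d)
    (hai : PySem.List.pyGet? a i = some ai) (hgtl : p < ai)
    (had : PySem.List.pyGet? a d = some ad) (hgtr : p < ad) :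
    pvLoop a i d p = pvLoop a i (d - 1) p := by
  conv_lhs => rw [pvLoop]
  conv_rhs => rw [pvLoop]
  rw [pvSL_stop a i d p ai hai hgtl, pvSL_stop a i (d - 1) p ai hai hgtl,
    pvSR_step a i d p ad hid had hgtr]

-- main simulation: A equals B's loop under the index precondition
theorem pvMain (n : Nat) (a : List Int) (p i d : Int)
    (hm : (d - i + 1).toNat ≤ n)
    (hpre : i > d ∨ (-(a.length : Int) ≤ i ∧ d < a.length)) :
    particion_Hoare_rec a i d p = pvLoop a i d p := by
  induction n generalizing a i d with
  | zero =>
    have hid : d < i := by omega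
    rw [pvA_off a i d p hid, pvLoop_off a i d p hid]
  | succ m ih =>
    by_cases hid : d < i
    · rw [pvA_off a i d p hid, pvLoop_off a i d p hid]
    · have hb1 : -(a.length : Int) ≤ i := by omega
      have hb2 : d < a.length := by omega
      obtain ⟨ai, hai⟩ := pvGet_some a i hb1 (by omega)
      obtain ⟨ad, had⟩ := pvGet_some a d (by omega) hb2
      by_cases h1 : ai ≤ p
      · -- skip left
        rw [(pvA_advance (d - i).toNat a p i d le_rfl hb1 hb2).1 (by omega) ai hai h1,
          pvLoop_skipL a i d p ai (by omega) hai h1]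
        exact ih a (i + 1) d (by omega) (Or.inr ⟨by omega, hb2⟩)
      · by_cases h2 : p < ad
        · -- skip right
          rw [(pvA_advance (d - i).toNat a p i d le_rfl hb1 hb2).2 (by omega) ad had h2,
            pvLoop_skipR a i d p ai ad (by omega) hai (by omega) had h2]
          exact ih a i (d - 1) (by omega) (Or.inr ⟨hb1, by omega⟩)
        · -- swap case on both sides
          have hswapA : particion_Hoare_rec a i d p =
              particion_Hoare_rec (pvSwap a i d ai ad) (i + 1) (d - 1) p := by
            conv_lhs => rw [particion_Hoare_rec]
            simp only [hai, had, if_neg (by omega : ¬ i > d)]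
            rw [if_pos ⟨by omega, by omega⟩]
          have hswapB : pvLoop a i d p = pvLoop (pvSwap a i d ai ad) (i + 1) (d - 1) p := by
            conv_lhs => rw [pvLoop]
            rw [pvSL_stop a i d p ai hai (by omega), pvSR_stop a i d p ad had (by omega)]
            simp only [hai, had, if_neg (by omega : ¬ i > d)]
          rw [hswapA, hswapB]
          have hlen := pvSwap_length a i d ai ad
          exact ih (pvSwap a i d ai ad) (i + 1) (d - 1) (by omega)
            (Or.inr ⟨by rw [hlen]; omega, by rw [hlen]; omega⟩)

-- ===== VERDICT (by name: the statement is the Claim_ definition above) =====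
theorem particion_Hoare_rec_spec : Claim_equal_particion_Hoare_rec := by
  intro a izq dcha pivote _ hpre
  unfold Spec_particion_Hoare_rec particion_Hoare_rec_alt
  have hpre' : izq > dcha ∨ (-(a.length : Int) ≤ izq ∧ dcha < a.length) := hpre
  exact pvMain (dcha - izq + 1).toNat a pivote izq dcha le_rfl hpre'
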